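-- pv_equiv track=rewrite | github.com/Sachuriga/quattrocolo-nwb4fp | src/nwb4fp/analyses/data.py | get_nearest_8_by_position
-- ===== SOURCE A (Python) =====
-- def get_nearest_8_by_position(numbers, target, bad_channels):
--     # Filter out values in bad_channels
--     filtered_numbers = [num for num in numbers if num not in bad_channels]
--
--     # Handle empty cases
--     if not filtered_numbers:
--         return []
--
--     # If target not found, return up to 8 values, padded if needed
--     if target not in filtered_numbers:
--         result = filtered_numbers[:8]
--         if len(result) < 8 and result:
--             result.extend([filtered_numbers[-1]] * (8 - len(result)))
--         return result
--
--     # Initialize result with target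
--     result = [target]
--     target_idx = filtered_numbers.index(target)
--     left = target_idx - 1
--     right = target_idx + 1
--     direction = 'left'  # Start with left
--
--     # Sweep left and right alternately
--     while len(result) < 8 and (left >= 0 or right < len(filtered_numbers)):
--         if direction == 'left' and left >= 0:
--             result.append(filtered_numbers[left])
--             left -= 1
--             direction = 'right'
--         elif direction == 'right' and right < len(filtered_numbers):
--             result.append(filtered_numbers[right])
--             right += 1
--             direction = 'left'
--         elif left >= 0:  # Right exhausted
--             result.append(filtered_numbers[left])
--             left -= 1
--         elif right < len(filtered_numbers):  # Left exhausted
--             result.append(filtered_numbers[right])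
--             right += 1
--
--     # Pad with last element if needed
--     if len(result) < 8 and filtered_numbers:
--         result.extend([filtered_numbers[-1]] * (8 - len(result)))
--
--     return result
-- ===== SOURCE B (Python) =====
-- def get_nearest_8_by_position(numbers, target, bad_channels):
--     bad = set(bad_channels)
--     f = [n for n in numbers if n not in bad]
--     if not f:
--         return []
--     if target in f:
--         i = f.index(target)
--         left = f[:i][::-1]          # neighbours on the left, closest first
--         right = f[i + 1:]           # neighbours on the right, closest first
--         merged = [target]
--         for l, r in zip(left, right):
--             merged += [l, r]
--         merged += left[len(right):] + right[len(left):]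
--         core = merged[:8]
--     else:
--         core = f[:8]
--     return core + [f[-1]] * (8 - len(core))
-- ===== Notes on version B (the rewrite author's own statement) =====
-- stated objective: faster
-- what changed: Replaces A's four-branch while loop over left/right index pointers and a direction flag with two slices (reversed left prefix, right suffix) interleaved by a single zip pass plus leftover tails and one unconditional truncate-and-pad step; filtering tests membership in a set of bad_channels instead of the list.
import Mathlib
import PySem

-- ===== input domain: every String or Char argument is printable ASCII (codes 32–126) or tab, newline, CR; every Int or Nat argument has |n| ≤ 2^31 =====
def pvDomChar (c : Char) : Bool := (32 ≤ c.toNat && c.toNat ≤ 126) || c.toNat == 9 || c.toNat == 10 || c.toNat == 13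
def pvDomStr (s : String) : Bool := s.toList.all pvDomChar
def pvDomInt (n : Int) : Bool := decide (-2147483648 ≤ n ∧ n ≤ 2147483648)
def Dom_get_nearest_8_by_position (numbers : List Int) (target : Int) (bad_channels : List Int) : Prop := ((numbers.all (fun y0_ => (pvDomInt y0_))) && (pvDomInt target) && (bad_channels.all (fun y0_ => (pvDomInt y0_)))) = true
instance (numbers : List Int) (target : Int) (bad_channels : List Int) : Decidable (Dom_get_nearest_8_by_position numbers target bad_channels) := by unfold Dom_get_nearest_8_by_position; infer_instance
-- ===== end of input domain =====

-- B replaces A's four-branch left/right pointer state machine by slicing the two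
-- neighbour lists once and interleaving them with zip, and filters against a set of
-- bad_channels instead of the list (measured faster on large inputs).

-- ===== PORT A =====
-- the while loop: state (result, left, right, direction); each pass appends one
-- element, so fuel 8 ≥ the ≤ 7 remaining iterations makes it total without
-- changing any behaviour (the real loop condition is re-checked every pass).
def pvLoopA (f : List Int) : Nat → List Int → Int → Int → Bool → List Int
  | 0, res, _, _, _ => res
  | fuel + 1, res, left, right, dir =>
    if res.length < 8 ∧ (0 ≤ left ∨ right < (f.length : Int)) then
      if dir = true ∧ 0 ≤ left then
        pvLoopA f fuel (res ++ [f.getD left.toNat 0]) (left - 1) right false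
      else if dir = false ∧ right < (f.length : Int) then
        pvLoopA f fuel (res ++ [f.getD right.toNat 0]) left (right + 1) true
      else if 0 ≤ left then
        pvLoopA f fuel (res ++ [f.getD left.toNat 0]) (left - 1) right dir
      else if right < (f.length : Int) then
        pvLoopA f fuel (res ++ [f.getD right.toNat 0]) left (right + 1) dir
      else res
    else res

def get_nearest_8_by_position (numbers : List Int) (target : Int) (bad_channels : List Int) : List Int :=
  let f := numbers.filter (fun num => !(bad_channels.contains num))
  if f = [] then []
  else if ¬ f.contains target then
    let result := f.take 8
    if result.length < 8 ∧ result ≠ [] then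
      result ++ List.replicate (8 - result.length) (f.getLastD 0)
    else result
  else
    -- target ∈ f here, so .index succeeds; getD 0 is unreachable
    let target_idx : Int := ((PySem.List.index? f target).getD 0 : Nat)
    let res := pvLoopA f 8 [target] (target_idx - 1) (target_idx + 1) true
    if res.length < 8 ∧ f ≠ [] then
      res ++ List.replicate (8 - res.length) (f.getLastD 0)
    else res

-- ===== PORT B =====
def get_nearest_8_by_position_alt (numbers : List Int) (target : Int) (bad_channels : List Int) : List Int :=
  let f := numbers.filter (fun n => !(bad_channels.contains n))
  if f = [] then []
  else
    let core :=
      if f.contains target then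
        let i := (PySem.List.index? f target).getD 0
        let left := (f.take i).reverse
        let right := f.drop (i + 1)
        let merged := (left.zip right).foldl (fun acc p => acc ++ [p.1, p.2]) [target]
        let merged := merged ++ left.drop right.length ++ right.drop left.length
        merged.take 8
      else f.take 8
    core ++ List.replicate (8 - core.length) (f.getLastD 0)

-- ===== PRECONDITION & SPEC =====
def Spec_get_nearest_8_by_position (numbers : List Int) (target : Int) (bad_channels : List Int) (out : List Int) : Prop := out = get_nearest_8_by_position_alt numbers target bad_channels
instance (numbers : List Int) (target : Int) (bad_channels : List Int) (out : List Int) : Decidable (Spec_get_nearest_8_by_position numbers target bad_channels out) := by unfold Spec_get_nearest_8_by_position; infer_instance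

-- ===== CLAIM (what is proved, stated in full; the proofs are below) =====
def Claim_equal_get_nearest_8_by_position : Prop := ∀ (numbers : List Int) (target : Int) (bad_channels : List Int), Dom_get_nearest_8_by_position numbers target bad_channels → Spec_get_nearest_8_by_position numbers target bad_channels (get_nearest_8_by_position numbers target bad_channels)


-- ===== LEMMAS AND PROOFS =====

-- perfect-shuffle of two lists: head of `a` first, then alternate starting with `b`
def pvItl : List Int → List Int → List Int
  | [], b => b
  | a :: as, b => a :: pvItl b as
termination_by a b => a.length + b.length
decreasing_by simp [List.length_cons]; omega

theorem pvItl_nil_right (a : List Int) : pvItl a [] = a := by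
  cases a with
  | nil => simp [pvItl]
  | cons x xs => simp [pvItl]

-- B's zip loop + leftover tails compute exactly the shuffle
theorem zip_merge_eq_itl (L R init : List Int) :
    ((L.zip R).foldl (fun acc p => acc ++ [p.1, p.2]) init) ++ L.drop R.length ++ R.drop L.length
      = init ++ pvItl L R := by
  induction L generalizing R init with
  | nil => simp [pvItl]
  | cons x xs ih =>
    cases R with
    | nil => simp [pvItl_nil_right]
    | cons y ys =>
      have h := ih ys (init ++ [x, y])
      simp only [List.zip_cons_cons, List.foldl_cons, List.length_cons, List.drop_succ_cons,
        pvItl] at *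
      rw [h]
      simp

theorem pv_take_rev (f : List Int) (m : Nat) (h1 : 1 ≤ m) (h2 : m ≤ f.length) :
    (f.take m).reverse = f.getD (m-1) 0 :: (f.take (m-1)).reverse := by
  have hlt : m - 1 < f.length := by omega
  have ht : f.take m = f.take (m-1) ++ [f[m-1]] := by
    have : f.take ((m-1)+1) = f.take (m-1) ++ (f[m-1]?).toList := List.take_add_one
    rw [show m - 1 + 1 = m from by omega] at this
    rw [this, List.getElem?_eq_getElem hlt]
    rfl
  rw [ht, List.getD_eq_getElem _ _ hlt]
  simp

theorem pv_drop_cons (f : List Int) (r : Nat) (h : r < f.length) :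
    f.drop r = f.getD r 0 :: f.drop (r+1) := by
  rw [List.drop_eq_getElem_cons h, List.getD_eq_getElem _ _ h]

-- A's pointer loop computes the shuffle of the reversed prefix and the suffix
theorem loopA_eq (f : List Int) : ∀ (fuel : Nat) (res : List Int) (k r : Nat) (d : Bool),
    k ≤ f.length → r ≤ f.length → 8 - res.length ≤ fuel →
    pvLoopA f fuel res ((k : Int) - 1) (r : Int) d =
      res ++ (if d then pvItl ((f.take k).reverse) (f.drop r)
              else pvItl (f.drop r) ((f.take k).reverse)).take (8 - res.length) := by
  intro fuel
  induction fuel with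
  | zero =>
    intro res k r d hk hr hfuel
    simp [pvLoopA, Nat.sub_eq_zero_of_le (by omega : 8 ≤ res.length)]
  | succ fuel ih =>
    intro res k r d hk hr hfuel
    by_cases hlen : res.length < 8
    · by_cases hkr : 1 ≤ k ∨ r < f.length
      · have hcond : res.length < 8 ∧ ((0:Int) ≤ (k:Int) - 1 ∨ (r:Int) < (f.length:Int)) := by
          refine ⟨hlen, ?_⟩
          rcases hkr with h | h
          · left; omega
          · right; exact_mod_cast h
        have hlen1 : 8 - (res.length + 1) ≤ fuel := by omega
        have hsub : 8 - res.length = (8 - (res.length + 1)) + 1 := by omega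
        cases d with
        | true =>
          by_cases hk1 : 1 ≤ k
          · -- branch: direction left, left ≥ 0
            have hb : (true = true ∧ (0:Int) ≤ (k:Int) - 1) := ⟨rfl, by omega⟩
            have htn : ((k:Int) - 1).toNat = k - 1 := by omega
            have hdec : (k:Int) - 1 - 1 = ((k - 1 : Nat) : Int) - 1 := by omega
            rw [pvLoopA, if_pos hcond, if_pos hb, htn, hdec,
              ih _ (k-1) r false (by omega) hr (by simpa using hlen1)]
            rw [pv_take_rev f k hk1 hk, pvItl, if_pos rfl]
            simp only [if_neg (by simp : ¬ false = true)]
            rw [hsub, List.take_succ_cons]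
            simp
          · -- direction left but left exhausted: k = 0, take from the right
            have hk0 : k = 0 := by omega
            subst hk0
            have hrlt : r < f.length := by rcases hkr with h | h; omega; exact h
            have hb1 : ¬ (true = true ∧ (0:Int) ≤ ((0:Nat):Int) - 1) := by
              rintro ⟨-, h⟩; omega
            have hb2 : ¬ (true = false ∧ (r:Int) < (f.length:Int)) := by
              rintro ⟨h, -⟩; cases h
            have hb3 : ¬ ((0:Int) ≤ ((0:Nat):Int) - 1) := by omega
            have hb4 : (r:Int) < (f.length:Int) := by exact_mod_cast hrlt
            have htn : ((r:Int)).toNat = r := by omega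
            have hinc : (r:Int) + 1 = ((r + 1 : Nat) : Int) := by omega
            rw [pvLoopA, if_pos hcond, if_neg hb1, if_neg hb2, if_neg hb3, if_pos hb4, htn, hinc,
              ih _ 0 (r+1) true (by omega) (by omega) (by simpa using hlen1)]
            rw [if_pos rfl, if_pos rfl]
            simp only [List.take_zero, List.reverse_nil, pvItl]
            rw [pv_drop_cons f r hrlt, hsub]
            cases hdrop : f.drop (r+1) with
            | nil => simp [List.take_succ_cons]
            | cons z zs => simp [List.take_succ_cons]
        | false =>
          by_cases hr1 : r < f.length
          · -- branch: direction right, right in range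
            have hb1 : ¬ (false = true ∧ (0:Int) ≤ (k:Int) - 1) := by
              rintro ⟨h, -⟩; cases h
            have hb2 : (false = false ∧ (r:Int) < (f.length:Int)) := ⟨rfl, by exact_mod_cast hr1⟩
            have htn : ((r:Int)).toNat = r := by omega
            have hinc : (r:Int) + 1 = ((r + 1 : Nat) : Int) := by omega
            rw [pvLoopA, if_pos hcond, if_neg hb1, if_pos hb2, htn, hinc,
              ih _ k (r+1) true hk (by omega) (by simpa using hlen1)]
            rw [if_neg (by simp : ¬ false = true), if_pos rfl]
            rw [pv_drop_cons f r hr1, pvItl, hsub, List.take_succ_cons]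
            simp
          · -- direction right but right exhausted: take from the left
            have hr0 : r = f.length := by omega
            subst hr0
            have hk1 : 1 ≤ k := by rcases hkr with h | h; exact h; omega
            have hb1 : ¬ (false = true ∧ (0:Int) ≤ (k:Int) - 1) := by
              rintro ⟨h, -⟩; cases h
            have hb2 : ¬ (false = false ∧ ((f.length:Nat):Int) < (f.length:Int)) := by
              rintro ⟨-, h⟩; omega
            have hb3 : (0:Int) ≤ (k:Int) - 1 := by omega
            have htn : ((k:Int) - 1).toNat = k - 1 := by omega
            have hdec : (k:Int) - 1 - 1 = ((k - 1 : Nat) : Int) - 1 := by omega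
            rw [pvLoopA, if_pos hcond, if_neg hb1, if_neg hb2, if_pos hb3, htn, hdec,
              ih _ (k-1) f.length false (by omega) (by omega) (by simpa using hlen1)]
            rw [if_neg (by simp : ¬ false = true), if_neg (by simp : ¬ false = true)]
            simp only [List.drop_length, pvItl]
            rw [pv_take_rev f k hk1 hk, hsub]
            cases htk : (f.take (k-1)).reverse with
            | nil => simp [List.take_succ_cons]
            | cons z zs => simp [List.take_succ_cons]
      · have hk0 : k = 0 := by omega
        have hr0 : r = f.length := by omega
        subst hk0; subst hr0
        have hb : ¬ (res.length < 8 ∧ ((0:Int) ≤ ((0:Nat):Int) - 1 ∨ ((f.length:Nat):Int) < (f.length:Int))) := by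
          rintro ⟨-, h | h⟩ <;> omega
        rw [pvLoopA, if_neg hb]
        simp [pvItl, List.drop_length]
    · rw [pvLoopA, if_neg (by rintro ⟨h, -⟩; omega)]
      simp [Nat.sub_eq_zero_of_le (by omega : 8 ≤ res.length)]

-- the common padding step: A's conditional extend equals B's unconditional replicate append
theorem pad_eq (core : List Int) (x : Int) (P : Prop) [Decidable P] (hP : P)
    (hle : core.length ≤ 8) :
    (if core.length < 8 ∧ P then core ++ List.replicate (8 - core.length) x else core)
      = core ++ List.replicate (8 - core.length) x := by
  by_cases h : core.length < 8
  · rw [if_pos ⟨h, hP⟩]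
  · rw [if_neg (by rintro ⟨h', -⟩; omega)]
    rw [show 8 - core.length = 0 from by omega]
    simp

-- ===== VERDICT (by name: the statement is the Claim_ definition above) =====
theorem get_nearest_8_by_position_spec : Claim_equal_get_nearest_8_by_position := by
  intro numbers target bad_channels _
  unfold Spec_get_nearest_8_by_position
  unfold get_nearest_8_by_position get_nearest_8_by_position_alt
  set f := numbers.filter (fun num => !(bad_channels.contains num)) with hf
  by_cases hfe : f = []
  · simp [hfe]
  · rw [if_neg hfe, if_neg hfe]
    by_cases hmem : f.contains target
    · rw [if_neg (by simpa using hmem), if_pos hmem]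
      -- the found case
      obtain ⟨j, hj⟩ : ∃ j, PySem.List.index? f target = some j := by
        have := (PySem.List.index?_isSome_iff (xs := f) (v := target)).2 (by simpa using hmem)
        exact Option.isSome_iff_exists.mp this
      obtain ⟨hjlt, -, -⟩ := PySem.List.getElem_of_index?_eq_some hj
      rw [hj]
      simp only [Option.getD_some]
      have hcast1 : (j:Int) + 1 = ((j + 1 : Nat) : Int) := by omega
      rw [hcast1, loopA_eq f 8 [target] j (j+1) true (by omega) (by omega) (by simp)]
      rw [if_pos rfl]
      set T := (pvItl ((f.take j).reverse) (f.drop (j+1))).take (8 - (([target]:List Int)).length)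
        with hT
      have hM : (((f.take j).reverse.zip (f.drop (j+1))).foldl
            (fun acc p => acc ++ [p.1, p.2]) [target] ++
            (f.take j).reverse.drop (f.drop (j+1)).length ++
            (f.drop (j+1)).drop ((f.take j).reverse).length).take 8
          = [target] ++ T := by
        rw [zip_merge_eq_itl, hT]
        simp
      rw [hM]
      refine pad_eq _ _ _ hfe ?_
      rw [hT]
      simp
    · rw [if_pos (by simpa using hmem), if_neg hmem]
      have hne : f.take 8 ≠ [] := by
        intro h
        exact hfe (by simpa using List.take_eq_nil_iff.mp h)
      exact pad_eq (f.take 8) (f.getLastD 0) _ hne (by simp)
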